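-- pv_equiv track=rewrite | github.com/rogerfiske/visualizer | src/predictor/filters.py | unit_number_group_count
-- ===== SOURCE A (Python) =====
-- from typing import List, Dict, Tuple, Set, Optional, Callable
--
-- def unit_number_group_count(ticket: List[int]) -> int:
--     """Filter 23: Count of consecutive unit digit groups."""
--     units = sorted(set(n % 10 for n in ticket))
--     if not units:
--         return 0
--     groups = 1
--     for i in range(1, len(units)):
--         if units[i] != units[i-1] + 1:
--             groups += 1
--     return groups
-- ===== SOURCE B (Python) =====
-- def unit_number_group_count(ticket):
--     """Filter 23: Count of consecutive unit digit groups."""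
--     units = {n % 10 for n in ticket}
--     return sum(1 for d in range(10) if d in units and d - 1 not in units)
-- ===== Notes on version B (the rewrite author's own statement) =====
-- stated objective: simpler
-- what changed: Instead of sorting the distinct unit digits and scanning adjacent pairs for gaps, B scans the fixed digit domain 0..9 once and counts digits that are present while their predecessor digit is absent (group starts); no sort, no index arithmetic over a sorted list.
import Mathlib
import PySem

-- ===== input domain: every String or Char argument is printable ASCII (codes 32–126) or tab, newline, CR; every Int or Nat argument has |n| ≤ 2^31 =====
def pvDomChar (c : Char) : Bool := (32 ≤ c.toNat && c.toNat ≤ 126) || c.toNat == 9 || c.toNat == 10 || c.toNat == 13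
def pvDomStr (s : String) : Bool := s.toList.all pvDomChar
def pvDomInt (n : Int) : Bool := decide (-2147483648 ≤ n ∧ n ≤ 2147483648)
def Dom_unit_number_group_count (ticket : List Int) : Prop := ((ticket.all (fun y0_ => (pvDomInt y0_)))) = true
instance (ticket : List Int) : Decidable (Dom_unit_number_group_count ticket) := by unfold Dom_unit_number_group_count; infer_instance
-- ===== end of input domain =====

-- B replaces A's sort-the-distinct-digits-and-scan-adjacent-pairs by a single pass over the
-- fixed digit domain 0..9 counting present digits whose predecessor digit is absent (simpler).

-- ===== PORT A =====
def unit_number_group_count (ticket : List Int) : Int :=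
  let units := PySem.List.sorted (PySem.Set.ofList (ticket.map (fun n => PySem.Int.mod n 10))) (fun x => x) false
  if units = [] then 0
  else
    (PySem.List.pyRange 1 (units.length : Int) 1).foldl
      (fun groups i =>
        if PySem.List.pyGetD units i 0 ≠ PySem.List.pyGetD units (i - 1) 0 + 1 then groups + 1
        else groups)
      1

-- ===== PORT B =====
def unit_number_group_count_alt (ticket : List Int) : Int :=
  let units : PySem.Set Int := PySem.Set.ofList (ticket.map (fun n => PySem.Int.mod n 10))
  (PySem.List.pyRange 0 10 1).foldl
    (fun g d => if (PySem.Set.contains units d && !PySem.Set.contains units (d - 1)) = true then g + 1 else g)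
    0

-- ===== PRECONDITION & SPEC =====
def Spec_unit_number_group_count (ticket : List Int) (out : Int) : Prop := out = unit_number_group_count_alt ticket
instance (ticket : List Int) (out : Int) : Decidable (Spec_unit_number_group_count ticket out) := by unfold Spec_unit_number_group_count; infer_instance

-- ===== CLAIM (what is proved, stated in full; the proofs are below) =====
def Claim_equal_unit_number_group_count : Prop := ∀ (ticket : List Int), Dom_unit_number_group_count ticket → Spec_unit_number_group_count ticket (unit_number_group_count ticket)

-- ===== LEMMAS AND PROOFS =====

-- A's inner computation, as a function of the sorted distinct-digit list.
def pvACount (us : List Int) : Int :=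
  if us = [] then 0
  else
    (PySem.List.pyRange 1 (us.length : Int) 1).foldl
      (fun groups i =>
        if PySem.List.pyGetD us i 0 ≠ PySem.List.pyGetD us (i - 1) 0 + 1 then groups + 1
        else groups)
      1

-- B's inner computation, as a function of the presence predicate.
def pvBCount (p : Int → Bool) : Int :=
  (PySem.List.pyRange 0 10 1).foldl
    (fun g d => if (p d && !p (d - 1)) = true then g + 1 else g) 0

-- presence predicate determined by ten booleans
def pvFun (b0 b1 b2 b3 b4 b5 b6 b7 b8 b9 : Bool) : Int → Bool := fun v =>
  if v = 0 then b0 else if v = 1 then b1 else if v = 2 then b2 else if v = 3 then b3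
  else if v = 4 then b4 else if v = 5 then b5 else if v = 6 then b6 else if v = 7 then b7
  else if v = 8 then b8 else if v = 9 then b9 else false

lemma pv_key_bits (b0 b1 b2 b3 b4 b5 b6 b7 b8 b9 : Bool) :
    pvACount (((PySem.List.pyRange 0 10 1).filter (pvFun b0 b1 b2 b3 b4 b5 b6 b7 b8 b9)))
      = pvBCount (pvFun b0 b1 b2 b3 b4 b5 b6 b7 b8 b9) := by
  revert b0 b1 b2 b3 b4 b5 b6 b7 b8 b9
  decide

lemma pv_key (p : Int → Bool) (hneg : p (-1) = false) :
    pvACount ((PySem.List.pyRange 0 10 1).filter p) = pvBCount p := by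
  have hagree : ∀ v ∈ PySem.List.pyRange 0 10 1,
      pvFun (p 0) (p 1) (p 2) (p 3) (p 4) (p 5) (p 6) (p 7) (p 8) (p 9) v = p v := by
    intro v hv
    obtain ⟨h1, h2⟩ := PySem.List.mem_pyRange_one.mp hv
    interval_cases v <;> simp [pvFun]
  have hagree' : ∀ v ∈ PySem.List.pyRange 0 10 1,
      pvFun (p 0) (p 1) (p 2) (p 3) (p 4) (p 5) (p 6) (p 7) (p 8) (p 9) (v - 1) = p (v - 1) := by
    intro v hv
    obtain ⟨h1, h2⟩ := PySem.List.mem_pyRange_one.mp hv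
    interval_cases v <;> simp [pvFun, hneg]
  have h1 : (PySem.List.pyRange 0 10 1).filter p
      = (PySem.List.pyRange 0 10 1).filter
          (pvFun (p 0) (p 1) (p 2) (p 3) (p 4) (p 5) (p 6) (p 7) (p 8) (p 9)) := by
    apply List.filter_congr
    intro v hv; rw [hagree v hv]
  have h2 : pvBCount p
      = pvBCount (pvFun (p 0) (p 1) (p 2) (p 3) (p 4) (p 5) (p 6) (p 7) (p 8) (p 9)) := by
    unfold pvBCount
    apply PySem.List.foldl_congr_mem
    intro acc v hv
    rw [hagree v hv, hagree' v hv]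
  rw [h1, h2, pv_key_bits]

-- the sorted distinct-digit list is the filter of 0..9 by presence
lemma pv_sorted_eq (l : List Int) (hl : ∀ x ∈ l, 0 ≤ x ∧ x < 10) :
    PySem.List.sorted (PySem.Set.ofList l) (fun x => x) false
      = (PySem.List.pyRange 0 10 1).filter (fun v => PySem.Set.contains (PySem.Set.ofList l) v) := by
  apply PySem.List.sorted_eq_of_perm_of_pairwise_lt
  · rw [List.perm_ext_iff_of_nodup
      (List.Nodup.filter _ (PySem.List.nodup_pyRange_one 0 10)) (PySem.Set.nodup_ofList l)]
    intro a
    simp only [List.mem_filter, PySem.List.mem_pyRange_one, PySem.Set.contains_iff]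
    constructor
    · rintro ⟨_, h⟩; exact h
    · intro h
      have := hl a ((PySem.Set.mem_ofList l a).mp h)
      exact ⟨⟨this.1, this.2⟩, h⟩
  · exact List.Pairwise.filter _ (PySem.List.pairwise_lt_pyRange_one 0 10)

theorem pv_main (ticket : List Int) :
    unit_number_group_count ticket = unit_number_group_count_alt ticket := by
  unfold unit_number_group_count unit_number_group_count_alt
  set l := ticket.map (fun n => PySem.Int.mod n 10) with hl_def
  have hl : ∀ x ∈ l, 0 ≤ x ∧ x < 10 := by
    intro x hx
    rw [hl_def, List.mem_map] at hx
    obtain ⟨n, _, rfl⟩ := hx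
    exact ⟨PySem.Int.mod_nonneg n (by norm_num), PySem.Int.mod_lt n (by norm_num)⟩
  have hneg : PySem.Set.contains (PySem.Set.ofList l) (-1) = false := by
    rw [Bool.eq_false_iff]
    intro h
    have := hl (-1) ((PySem.Set.mem_ofList l (-1)).mp ((PySem.Set.contains_iff _ _).mp h))
    omega
  have := pv_key (fun v => PySem.Set.contains (PySem.Set.ofList l) v) hneg
  unfold pvACount pvBCount at this
  rw [pv_sorted_eq l hl]
  simpa using this

-- ===== VERDICT (by name: the statement is the Claim_ definition above) =====
theorem unit_number_group_count_spec : Claim_equal_unit_number_group_count := by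
  intro ticket _
  unfold Spec_unit_number_group_count
  exact pv_main ticket
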